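-- pv_equiv track=rewrite | github.com/elizazavlieva/Algorithms_with_Python | 03_graph_theory_traversal_and_topological_sorting_exercises/03_salaries.py | dfs
-- ===== SOURCE A (Python) =====
-- def dfs(emp, graph, salaries):
--     if salaries[emp]:
--         return salaries[emp]
--
--     if len(graph[emp]) == 0:
--         salaries[emp] = 1
--         return 1
--
--     salary = 0
--     for child in graph[emp]:
--         salary += dfs(child, graph, salaries)
--
--     salaries[emp] = salary
--     return salary
-- ===== SOURCE B (Python) =====
-- def dfs(emp, graph, salaries):
--     # Bottom-up fixed-point relaxation instead of recursive memoized DFS.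
--     # Computes the same return value; does not write back into `salaries`.
--     if salaries[emp]:
--         return salaries[emp]
--     val = {n: s for n, s in salaries.items() if s}
--     for _ in range(len(graph) + 1):
--         if emp in val:
--             break
--         for n, children in graph.items():
--             if n not in val and all(c in val for c in children):
--                 val[n] = 1 if not children else sum(val[c] for c in children)
--     return val[emp]
-- ===== Notes on version B (the rewrite author's own statement) =====
-- stated objective: alternative
-- what changed: Replaces A's top-down recursive DFS with truthiness memoization into the shared salaries dict by a bottom-up fixed-point relaxation: seed a table with the truthy salaries, then repeatedly resolve any graph node whose children are all resolved (leaf = 1, else sum of children) until emp is resolved, without recursion and without mutating the input.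
import Mathlib
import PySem

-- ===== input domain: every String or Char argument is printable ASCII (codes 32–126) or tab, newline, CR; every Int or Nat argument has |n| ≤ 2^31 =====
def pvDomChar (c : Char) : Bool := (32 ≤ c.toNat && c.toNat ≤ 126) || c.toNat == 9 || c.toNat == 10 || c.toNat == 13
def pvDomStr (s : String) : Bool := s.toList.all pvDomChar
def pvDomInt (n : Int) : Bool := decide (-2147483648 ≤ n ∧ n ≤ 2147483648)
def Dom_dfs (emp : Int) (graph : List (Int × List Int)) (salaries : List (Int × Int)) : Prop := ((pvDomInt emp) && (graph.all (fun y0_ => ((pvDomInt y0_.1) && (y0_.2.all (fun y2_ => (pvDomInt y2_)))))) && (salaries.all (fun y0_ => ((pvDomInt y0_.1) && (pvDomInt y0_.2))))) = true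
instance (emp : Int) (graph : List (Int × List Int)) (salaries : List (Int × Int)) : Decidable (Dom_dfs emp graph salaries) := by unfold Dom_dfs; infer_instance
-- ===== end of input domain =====

-- B replaces A's recursive memoized DFS by a bottom-up fixed-point relaxation over the graph; the
-- equivalence proved here is about the RETURN value only (A mutates `salaries` in place, B does not).

-- ===== PORT A =====
-- A's recursion has no structural measure in Lean; the Nat fuel (graph.length + 1) is only a
-- totality guard — under Pre_dfs it is proved never to run out.  The `none` branches of the dict
-- lookups are Python's KeyError (excluded by Pre_dfs); state is threaded because A mutates `salaries`.
mutual
def dfsA (graph : PySem.Dict Int (List Int)) : Nat → Int → PySem.Dict Int Int → Int × PySem.Dict Int Int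
  | 0, _, st => (0, st)
  | f+1, n, st =>
    match PySem.Dict.get? st n with
    | none => (0, st)                                   -- KeyError: salaries[emp]
    | some s =>
      if s ≠ 0 then (s, st)                             -- if salaries[emp]: return salaries[emp]
      else
        match PySem.Dict.get? graph n with
        | none => (0, st)                               -- KeyError: graph[emp]
        | some cs =>
          if cs.length = 0 then (1, PySem.Dict.insert st n 1)
          else
            let q := dfsAList graph f cs st 0          -- for child in graph[emp]: salary += dfs(...)
            (q.1, PySem.Dict.insert q.2 n q.1)
termination_by f n st => (f, 0)

def dfsAList (graph : PySem.Dict Int (List Int)) : Nat → List Int → PySem.Dict Int Int → Int → Int × PySem.Dict Int Int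
  | _, [], st, salary => (salary, st)
  | f, c :: cs, st, salary =>
    let r := dfsA graph f c st
    dfsAList graph f cs r.2 (salary + r.1)
termination_by f cs st salary => (f, cs.length + 1)
end

def dfs (emp : Int) (graph : List (Int × List Int)) (salaries : List (Int × Int)) : Int :=
  (dfsA (PySem.Dict.mk graph) (graph.length + 1) emp (PySem.Dict.mk salaries)).1

-- ===== PORT B =====
-- transliteration of Source B; the loop bodies are named helpers: bInsStep builds
-- `val = {n: s for n, s in salaries.items() if s}`, bNodeStep is the body of
-- `for n, children in graph.items(): ...`, bRound is one iteration of
-- `for _ in range(len(graph) + 1)` together with its early `break` once emp is resolved,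
-- and bIter runs the len(graph)+1 rounds.  The final `.getD 0` is Python's KeyError
-- on `val[emp]` (excluded by Pre_dfs).
def bInsStep (d : PySem.Dict Int Int) (p : Int × Int) : PySem.Dict Int Int :=
  if p.2 ≠ 0 then d.insert p.1 p.2 else d

def bVal0 (salaries : List (Int × Int)) : PySem.Dict Int Int :=
  salaries.foldl bInsStep PySem.Dict.empty

def bNodeStep (val : PySem.Dict Int Int) (p : Int × List Int) : PySem.Dict Int Int :=
  if (PySem.Dict.get? val p.1).isNone && p.2.all (fun c => (PySem.Dict.get? val c).isSome)
  then PySem.Dict.insert val p.1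
         (if p.2.isEmpty then 1 else p.2.foldl (fun a c => a + PySem.Dict.getD val c 0) 0)
  else val

def bRound (emp : Int) (graph : List (Int × List Int)) (val : PySem.Dict Int Int) : PySem.Dict Int Int :=
  if (PySem.Dict.get? val emp).isSome then val else graph.foldl bNodeStep val

def bIter (emp : Int) (graph : List (Int × List Int)) : Nat → PySem.Dict Int Int → PySem.Dict Int Int
  | 0, val => val
  | k+1, val => bRound emp graph (bIter emp graph k val)

def dfs_alt (emp : Int) (graph : List (Int × List Int)) (salaries : List (Int × Int)) : Int :=
  match PySem.Dict.get? (PySem.Dict.mk salaries) emp with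
  | none => 0                                           -- KeyError: salaries[emp]
  | some s =>
    if s ≠ 0 then s
    else PySem.Dict.getD (bIter emp graph (graph.length + 1) (bVal0 salaries)) emp 0

-- ===== PRECONDITION & SPEC =====
-- solvSet graph salaries k: the nodes on which A's recursion provably returns within k levels of
-- the standard elimination order: a node is solvable if it has a truthy salary, or is a graph key
-- all of whose children are solvable at the previous level.
def solvSet (graph : List (Int × List Int)) (salaries : List (Int × Int)) : Nat → List Int
  | 0 => []
  | k+1 =>
    let S := solvSet graph salaries k
    (salaries.map Prod.fst).filter (fun n =>
      PySem.Dict.getD (PySem.Dict.mk salaries) n 0 != 0 ||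
      (match PySem.Dict.get? (PySem.Dict.mk graph) n with
       | some cs => cs.all (fun c => S.contains c)
       | none => false))

-- Pre_dfs excludes exactly: KeyError on salaries[emp]; and, when salaries[emp] is falsy, the inputs on
-- which A's recursion hits a KeyError or never terminates (RecursionError) — i.e. emp not solvable by
-- elimination.  The two Nodup conjuncts are vacuous on real Python inputs (a Python dict cannot carry
-- duplicate keys); they are stated only because the association-list encoding of dicts allows them.
def Pre_dfs (emp : Int) (graph : List (Int × List Int)) (salaries : List (Int × Int)) : Prop :=
  (salaries.map Prod.fst).Nodup ∧ (graph.map Prod.fst).Nodup ∧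
  (PySem.Dict.get? (PySem.Dict.mk salaries) emp).isSome = true ∧
  (PySem.Dict.getD (PySem.Dict.mk salaries) emp 0 = 0 →
    emp ∈ solvSet graph salaries (graph.length + 1))
instance (emp : Int) (graph : List (Int × List Int)) (salaries : List (Int × Int)) : Decidable (Pre_dfs emp graph salaries) := by unfold Pre_dfs; infer_instance

def pvWitness_dfs : Int × (List (Int × List Int)) × (List (Int × Int)) :=
  (1, [(1, [2, 3]), (2, []), (3, [])], [(1, 0), (2, 0), (3, 5)])

def Spec_dfs (emp : Int) (graph : List (Int × List Int)) (salaries : List (Int × Int)) (out : Int) : Prop := out = dfs_alt emp graph salaries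
instance (emp : Int) (graph : List (Int × List Int)) (salaries : List (Int × Int)) (out : Int) : Decidable (Spec_dfs emp graph salaries out) := by unfold Spec_dfs; infer_instance

-- ===== CLAIM (what is proved, stated in full; the proofs are below) =====
def Claim_equal_dfs : Prop := ∀ (emp : Int) (graph : List (Int × List Int)) (salaries : List (Int × Int)), Dom_dfs emp graph salaries → Pre_dfs emp graph salaries → Spec_dfs emp graph salaries (dfs emp graph salaries)

-- ===== LEMMAS AND PROOFS =====

-- The pure valuation both programs compute: PvVal g s n v means "the salary of n is v".
inductive PvVal (g : PySem.Dict Int (List Int)) (s : PySem.Dict Int Int) : Int → Int → Prop where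
  | memo {n v} : s.get? n = some v → v ≠ 0 → PvVal g s n v
  | node {n cs vs} : s.getD n 0 = 0 → g.get? n = some cs → vs.length = cs.length →
      (∀ p ∈ List.zip cs vs, PvVal g s p.1 p.2) →
      PvVal g s n (if cs.isEmpty then 1 else vs.sum)

theorem pvVal_unique {g : PySem.Dict Int (List Int)} {s : PySem.Dict Int Int} {n v v' : Int}
    (h : PvVal g s n v) (h' : PvVal g s n v') : v = v' := by
  induction h generalizing v' with
  | @memo n v hm hne =>
    cases h' with
    | memo hm' _ => rw [hm] at hm'; exact Option.some_inj.mp hm'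
    | node hz hg hlen hch =>
      exact absurd (PySem.Dict.getD_of_get?_eq_some s 0 hm ▸ hz) hne
  | @node n cs vs hz hg hlen hch ih =>
    cases h' with
    | memo hm' hne' =>
      exact absurd (PySem.Dict.getD_of_get?_eq_some s 0 hm' ▸ hz) hne'
    | @node _ cs' vs' hz' hg' hlen' hch' =>
      rw [hg] at hg'
      injection hg' with hcs
      subst hcs
      have hvs : vs = vs' := by
        apply List.ext_getElem (by omega)
        intro i hi hi'
        have hmem : (cs[i]'(by omega), vs[i]) ∈ List.zip cs vs := by
          have := List.getElem_zip (l := cs) (l' := vs) (i := i)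
            (h := by simp [List.length_zip]; omega)
          exact this ▸ List.getElem_mem _
        have hmem' : (cs[i]'(by omega), vs'[i]) ∈ List.zip cs vs' := by
          have := List.getElem_zip (l := cs) (l' := vs') (i := i)
            (h := by simp [List.length_zip]; omega)
          exact this ▸ List.getElem_mem _
        exact ih _ hmem (hch' _ hmem')
      rw [hvs]

-- invariant carried by A's mutated salaries dict
def pvGood (g : PySem.Dict Int (List Int)) (s0 st : PySem.Dict Int Int) : Prop :=
  (∀ m w, st.get? m = some w → w ≠ 0 → PvVal g s0 m w) ∧
  (∀ m, (st.get? m).isSome = (s0.get? m).isSome) ∧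
  (∀ m w, st.get? m = some w → w = 0 → s0.getD m 0 = 0)

theorem pvGood_init (g : PySem.Dict Int (List Int)) (s0 : PySem.Dict Int Int) : pvGood g s0 s0 := by
  refine ⟨fun m w hm hw => PvVal.memo hm hw, fun m => rfl, fun m w hm hw => ?_⟩
  rw [PySem.Dict.getD_of_get?_eq_some s0 0 hm]; exact hw

theorem pvGood_insert {g : PySem.Dict Int (List Int)} {s0 st : PySem.Dict Int Int} {n v : Int}
    (h : pvGood g s0 st) (hkey : (st.get? n).isSome = true)
    (hval : v ≠ 0 → PvVal g s0 n v) (hz : v = 0 → s0.getD n 0 = 0) :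
    pvGood g s0 (st.insert n v) := by
  obtain ⟨h1, h2, h3⟩ := h
  refine ⟨fun m w hm hw => ?_, fun m => ?_, fun m w hm hw => ?_⟩
  · rw [PySem.Dict.get?_insert] at hm
    by_cases hmn : m = n
    · simp [hmn] at hm; subst hmn; exact hm ▸ hval (hm ▸ hw)
    · simp [hmn] at hm; exact h1 m w hm hw
  · rw [PySem.Dict.get?_insert]
    by_cases hmn : m = n
    · rw [if_pos hmn, hmn, ← h2 n]
      rw [hkey]; exact (Option.isSome_some).symm ▸ rfl
    · simp [hmn]; exact h2 m
  · rw [PySem.Dict.get?_insert] at hm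
    by_cases hmn : m = n
    · simp [hmn] at hm; subst hmn; exact hz (hm ▸ hw)
    · simp [hmn] at hm; exact h3 m w hm hw

theorem solv_mem {graph : List (Int × List Int)} {salaries : List (Int × Int)} {k : Nat} {n : Int}
    (h : n ∈ solvSet graph salaries (k+1)) :
    n ∈ salaries.map Prod.fst ∧
    (PySem.Dict.getD (PySem.Dict.mk salaries) n 0 ≠ 0 ∨
     ∃ cs, PySem.Dict.get? (PySem.Dict.mk graph) n = some cs ∧ ∀ c ∈ cs, c ∈ solvSet graph salaries k) := by
  rw [solvSet, List.mem_filter] at h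
  obtain ⟨hmem, hcond⟩ := h
  refine ⟨hmem, ?_⟩
  simp only [Bool.or_eq_true, bne_iff_ne, ne_eq] at hcond
  rcases hcond with h0 | h0
  · exact Or.inl h0
  · right
    cases hg : PySem.Dict.get? (PySem.Dict.mk graph) n with
    | none => rw [hg] at h0; simp at h0
    | some cs =>
      rw [hg] at h0
      simp only [List.all_eq_true] at h0
      exact ⟨cs, rfl, fun c hc => List.contains_iff_mem.mp (h0 c hc)⟩

theorem dfsA_main (graph : List (Int × List Int)) (salaries : List (Int × Int)) :
    ∀ k n st f, n ∈ solvSet graph salaries k →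
      pvGood (PySem.Dict.mk graph) (PySem.Dict.mk salaries) st →
      k ≤ f →
      PvVal (PySem.Dict.mk graph) (PySem.Dict.mk salaries) n (dfsA (PySem.Dict.mk graph) f n st).1 ∧
      pvGood (PySem.Dict.mk graph) (PySem.Dict.mk salaries) (dfsA (PySem.Dict.mk graph) f n st).2 := by
  intro k
  induction k with
  | zero => intro n st f h; exact absurd h (by simp [solvSet])
  | succ k ih =>
    intro n st f hmem hGood hkf
    obtain ⟨hkeys, hcond⟩ := solv_mem hmem
    obtain ⟨f', rfl⟩ : ∃ f', f = f' + 1 := ⟨f - 1, by omega⟩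
    have hkf' : k ≤ f' := by omega
    have hS0some : (PySem.Dict.get? (PySem.Dict.mk salaries) n).isSome = true := by
      rw [Option.isSome_iff_ne_none]
      intro hnone
      exact (PySem.Dict.get?_eq_none_iff_not_mem_keys _ n).mp hnone
        (by rw [PySem.Dict.keys_mk]; exact hkeys)
    have hstsome : (PySem.Dict.get? st n).isSome = true := by rw [hGood.2.1 n]; exact hS0some
    obtain ⟨s, hs⟩ := Option.isSome_iff_exists.mp hstsome
    rw [dfsA]
    rw [hs]
    by_cases hs0 : s = 0
    · subst hs0
      have hz : PySem.Dict.getD (PySem.Dict.mk salaries) n 0 = 0 := hGood.2.2 n 0 hs rfl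
      obtain ⟨cs, hg, hch⟩ : ∃ cs, PySem.Dict.get? (PySem.Dict.mk graph) n = some cs ∧
          ∀ c ∈ cs, c ∈ solvSet graph salaries k := by
        rcases hcond with h0 | h0
        · exact absurd hz h0
        · exact h0
      simp only [ne_eq, not_true_eq_false, if_false]
      rw [hg]
      by_cases hcs : cs.length = 0
      · have hcsnil : cs = [] := List.length_eq_zero_iff.mp hcs
        subst hcsnil
        simp only []
        constructor
        · have := PvVal.node (g := PySem.Dict.mk graph) (s := PySem.Dict.mk salaries)
            (vs := []) hz hg rfl (by intro p hp; simp at hp)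
          simpa using this
        · exact pvGood_insert hGood hstsome (fun _ => by
            have := PvVal.node (g := PySem.Dict.mk graph) (s := PySem.Dict.mk salaries)
              (vs := []) hz hg rfl (by intro p hp; simp at hp)
            simpa using this) (fun h1 => by omega)
      · simp only [hcs, if_false]
        have hlist : ∀ cs', (∀ c ∈ cs', c ∈ solvSet graph salaries k) →
            ∀ st acc, pvGood (PySem.Dict.mk graph) (PySem.Dict.mk salaries) st →
            ∃ vs, (dfsAList (PySem.Dict.mk graph) f' cs' st acc).1 = acc + vs.sum ∧
              vs.length = cs'.length ∧
              (∀ p ∈ List.zip cs' vs, PvVal (PySem.Dict.mk graph) (PySem.Dict.mk salaries) p.1 p.2) ∧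
              pvGood (PySem.Dict.mk graph) (PySem.Dict.mk salaries)
                (dfsAList (PySem.Dict.mk graph) f' cs' st acc).2 := by
          intro cs'
          induction cs' with
          | nil => intro _ st acc hG; exact ⟨[], by simp [dfsAList], rfl, by simp, by simp [dfsAList]; exact hG⟩
          | cons c cs'' ih2 =>
            intro hall st acc hG
            obtain ⟨hv, hG'⟩ := ih (c) st f' (hall c (by simp)) hG hkf'
            obtain ⟨vs, hsum, hlen, hvals, hGfin⟩ :=
              ih2 (fun c hc => hall c (by simp [hc])) (dfsA (PySem.Dict.mk graph) f' c st).2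
                (acc + (dfsA (PySem.Dict.mk graph) f' c st).1) hG'
            refine ⟨(dfsA (PySem.Dict.mk graph) f' c st).1 :: vs, ?_, by simp [hlen], ?_, ?_⟩
            · rw [dfsAList]
              show (dfsAList (PySem.Dict.mk graph) f' cs'' (dfsA (PySem.Dict.mk graph) f' c st).2
                  (acc + (dfsA (PySem.Dict.mk graph) f' c st).1)).1 = _
              rw [hsum, List.sum_cons]; ring
            · intro p hp
              rcases List.mem_cons.mp hp with h1 | h1
              · subst h1; exact hv
              · exact hvals p h1
            · rw [dfsAList]; exact hGfin
        obtain ⟨vs, hsum, hlen, hvals, hGfin⟩ := hlist cs hch st 0 hGood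
        have hne : cs.isEmpty = false := by
          cases cs with
          | nil => simp at hcs
          | cons a l => rfl
        have hval0 := PvVal.node (g := PySem.Dict.mk graph) (s := PySem.Dict.mk salaries)
          (vs := vs) hz hg hlen hvals
        rw [hne] at hval0
        simp only [Bool.false_eq_true, if_false] at hval0
        have hval : PvVal (PySem.Dict.mk graph) (PySem.Dict.mk salaries) n
            (dfsAList (PySem.Dict.mk graph) f' cs st 0).1 := by
          rw [hsum, zero_add]; exact hval0
        refine ⟨hval, ?_⟩
        exact pvGood_insert hGfin (by rw [hGfin.2.1 n]; exact hS0some) (fun _ => hval)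
          (fun _ => hz)
    · simp only [ne_eq, hs0, not_false_eq_true, if_true]
      exact ⟨hGood.1 n s hs hs0, hGood⟩


-- ===== B-side lemmas =====

theorem bInsStep_mono {d : PySem.Dict Int Int} {p : Int × Int} {m : Int}
    (h : (d.get? m).isSome = true) : ((bInsStep d p).get? m).isSome = true := by
  unfold bInsStep
  split_ifs with h2
  · rw [PySem.Dict.get?_insert]; split_ifs <;> simp [h]
  · exact h

theorem bNodeStep_mono {val : PySem.Dict Int Int} {p : Int × List Int} {m : Int}
    (h : (val.get? m).isSome = true) : ((bNodeStep val p).get? m).isSome = true := by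
  unfold bNodeStep
  by_cases hguard : ((PySem.Dict.get? val p.1).isNone
      && p.2.all fun c => (PySem.Dict.get? val c).isSome) = true
  · rw [if_pos hguard, PySem.Dict.get?_insert]; split_ifs <;> simp [h]
  · rw [if_neg hguard]; exact h

theorem bFold_mono {l : List (Int × List Int)} {val : PySem.Dict Int Int} {m : Int}
    (h : (val.get? m).isSome = true) : ((l.foldl bNodeStep val).get? m).isSome = true := by
  induction l generalizing val with
  | nil => exact h
  | cons p l ih => exact ih (bNodeStep_mono h)

theorem bRound_mono {emp : Int} {graph : List (Int × List Int)} {val : PySem.Dict Int Int} {m : Int}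
    (h : (val.get? m).isSome = true) : (((bRound emp graph val)).get? m).isSome = true := by
  unfold bRound
  split_ifs with h2
  · exact h
  · exact bFold_mono h

-- the invariant of B's relaxation table: every entry is a true value, and every
-- truthy initial salary is present
def pvTGood (g : PySem.Dict Int (List Int)) (s0 val : PySem.Dict Int Int) : Prop :=
  (∀ m w, val.get? m = some w → PvVal g s0 m w) ∧
  (∀ m, s0.getD m 0 ≠ 0 → (val.get? m).isSome = true)

theorem bVal0_entries (salaries : List (Int × Int)) :
    ∀ m w, (bVal0 salaries).get? m = some w → (m, w) ∈ salaries ∧ w ≠ 0 := by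
  have gen : ∀ (l : List (Int × Int)) (d : PySem.Dict Int Int),
      (∀ m w, d.get? m = some w → (m, w) ∈ salaries ∧ w ≠ 0) →
      (∀ p ∈ l, p ∈ salaries) →
      ∀ m w, ((l.foldl bInsStep d).get? m = some w) → (m, w) ∈ salaries ∧ w ≠ 0 := by
    intro l
    induction l with
    | nil => intro d hd _ m w hm; exact hd m w hm
    | cons p l ih =>
      intro d hd hl m w hm
      refine ih (bInsStep d p) ?_ (fun q hq => hl q (by simp [hq])) m w hm
      intro m w hm
      unfold bInsStep at hm
      split_ifs at hm with h2
      · rw [PySem.Dict.get?_insert] at hm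
        split_ifs at hm with h3
        · obtain rfl := h3
          obtain rfl : p.2 = w := Option.some_inj.mp hm
          exact ⟨hl p (by simp), h2⟩
        · exact hd m w hm
      · exact hd m w hm
  intro m w hm
  exact gen salaries PySem.Dict.empty (by intro m w h; rw [PySem.Dict.get?_empty] at h; cases h)
    (fun p hp => hp) m w hm

theorem bFoldIns_mono {m : Int} : ∀ (l : List (Int × Int)) (d : PySem.Dict Int Int),
    (d.get? m).isSome = true → ((l.foldl bInsStep d).get? m).isSome = true := by
  intro l
  induction l with
  | nil => intro d h; exact h
  | cons p l ih => intro d h; rw [List.foldl_cons]; exact ih _ (bInsStep_mono h)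

theorem bVal0_present {salaries : List (Int × Int)} {m w : Int}
    (hm : (m, w) ∈ salaries) (hw : w ≠ 0) : ((bVal0 salaries).get? m).isSome = true := by
  have gen : ∀ (l : List (Int × Int)) (d : PySem.Dict Int Int), (m, w) ∈ l →
      ((l.foldl bInsStep d).get? m).isSome = true := by
    intro l
    induction l with
    | nil => intro d h; cases h
    | cons p l ih =>
      intro d h
      rw [List.foldl_cons]
      rcases List.mem_cons.mp h with h1 | h1
      · refine bFoldIns_mono l _ ?_
        unfold bInsStep
        rw [← h1]
        simp only [ne_eq, hw, not_false_eq_true, if_true]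
        rw [PySem.Dict.get?_insert]
        simp
      · exact ih (bInsStep d p) h1
  exact gen salaries PySem.Dict.empty hm

theorem pvTGood_val0 {graph : List (Int × List Int)} {salaries : List (Int × Int)}
    (hns : (salaries.map Prod.fst).Nodup) :
    pvTGood (PySem.Dict.mk graph) (PySem.Dict.mk salaries) (bVal0 salaries) := by
  constructor
  · intro m w hm
    obtain ⟨hmem, hw⟩ := bVal0_entries salaries m w hm
    have : (PySem.Dict.mk salaries).get? m = some w :=
      PySem.Dict.get?_of_mem_items (PySem.Dict.mk salaries) hmem
        (by rw [PySem.Dict.keys_mk]; exact hns)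
    exact PvVal.memo this hw
  · intro m hm
    cases hget : (PySem.Dict.mk salaries).get? m with
    | none =>
      rw [PySem.Dict.getD_eq_get?_getD, hget] at hm
      simp at hm
    | some w =>
      have hw : w ≠ 0 := by
        rw [PySem.Dict.getD_eq_get?_getD, hget] at hm
        simpa using hm
      exact bVal0_present (PySem.Dict.mem_items_of_get?_eq_some _ hget) hw

theorem pvTGood_nodeStep {graph : List (Int × List Int)} {salaries : List (Int × Int)}
    (hng : (graph.map Prod.fst).Nodup) {val : PySem.Dict Int Int} {p : Int × List Int}
    (hp : p ∈ graph) (h : pvTGood (PySem.Dict.mk graph) (PySem.Dict.mk salaries) val) :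
    pvTGood (PySem.Dict.mk graph) (PySem.Dict.mk salaries) (bNodeStep val p) := by
  unfold bNodeStep
  by_cases hguard : ((PySem.Dict.get? val p.1).isNone
      && p.2.all fun c => (PySem.Dict.get? val c).isSome) = true
  swap
  · rw [if_neg hguard]; exact h
  rw [if_pos hguard]
  obtain ⟨hnone, hall⟩ : (PySem.Dict.get? val p.1).isNone = true ∧
      (p.2.all fun c => (PySem.Dict.get? val c).isSome) = true := by simpa using hguard
  simp only [List.all_eq_true] at hall
  have hz : (PySem.Dict.mk salaries).getD p.1 0 = 0 := by
    by_contra hne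
    have := h.2 p.1 hne
    rw [Option.isNone_iff_eq_none.mp hnone] at this
    cases this
  have hg : (PySem.Dict.mk graph).get? p.1 = some p.2 :=
    PySem.Dict.get?_of_mem_items (PySem.Dict.mk graph) (by exact hp)
      (by rw [PySem.Dict.keys_mk]; exact hng)
  have hval : PvVal (PySem.Dict.mk graph) (PySem.Dict.mk salaries) p.1
      (if p.2.isEmpty then 1 else p.2.foldl (fun a c => a + PySem.Dict.getD val c 0) 0) := by
    have hnode := PvVal.node (g := PySem.Dict.mk graph) (s := PySem.Dict.mk salaries)
      (vs := p.2.map (fun c => PySem.Dict.getD val c 0)) hz hg (by simp)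
      (by
        intro q hq
        have : List.zip p.2 (p.2.map (fun c => PySem.Dict.getD val c 0)) =
            p.2.map (fun c => (c, PySem.Dict.getD val c 0)) := by
          have := List.zip_map' (f := fun (c : Int) => c)
            (g := fun c => PySem.Dict.getD val c 0) (l := p.2)
          simpa using this
        rw [this] at hq
        obtain ⟨c, hc, rfl⟩ := List.mem_map.mp hq
        obtain ⟨w, hw⟩ := Option.isSome_iff_exists.mp (hall c hc)
        rw [PySem.Dict.getD_eq_get?_getD, hw]
        exact h.1 c w hw)
    have hsum : (p.2.map (fun c => PySem.Dict.getD val c 0)).sum =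
        p.2.foldl (fun a c => a + PySem.Dict.getD val c 0) 0 := by
      rw [PySem.List.foldl_add, zero_add]
    cases hE : p.2.isEmpty with
    | true => rw [hE] at hnode; simpa [hE] using hnode
    | false => rw [hE] at hnode; simp only [Bool.false_eq_true, if_false] at hnode ⊢; rw [← hsum]; exact hnode
  constructor
  · intro m w hm
    rw [PySem.Dict.get?_insert] at hm
    by_cases hmp : m = p.1
    · rw [if_pos hmp] at hm
      obtain rfl := Option.some_inj.mp hm
      exact hmp ▸ hval
    · rw [if_neg hmp] at hm
      exact h.1 m w hm
  · intro m hm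
    rw [PySem.Dict.get?_insert]
    by_cases hmp : m = p.1
    · rw [if_pos hmp]; simp
    · rw [if_neg hmp]; exact h.2 m hm

theorem pvTGood_iter {emp : Int} {graph : List (Int × List Int)} {salaries : List (Int × Int)}
    (hng : (graph.map Prod.fst).Nodup) {val : PySem.Dict Int Int}
    (h : pvTGood (PySem.Dict.mk graph) (PySem.Dict.mk salaries) val) (k : Nat) :
    pvTGood (PySem.Dict.mk graph) (PySem.Dict.mk salaries) (bIter emp graph k val) := by
  induction k with
  | zero => exact h
  | succ k ih =>
    show pvTGood _ _ (bRound emp graph (bIter emp graph k val))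
    unfold bRound
    split_ifs with h2
    · exact ih
    · have gen : ∀ (l : List (Int × List Int)), (∀ p ∈ l, p ∈ graph) →
          ∀ v, pvTGood (PySem.Dict.mk graph) (PySem.Dict.mk salaries) v →
          pvTGood (PySem.Dict.mk graph) (PySem.Dict.mk salaries) (l.foldl bNodeStep v) := by
        intro l
        induction l with
        | nil => intro _ v hv; exact hv
        | cons p l ihl =>
          intro hl v hv
          exact ihl (fun q hq => hl q (by simp [hq])) _ (pvTGood_nodeStep hng (hl p (by simp)) hv)
      exact gen graph (fun p hp => hp) _ ih

theorem bEntry_present {n : Int} {cs : List Int} :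
    ∀ (l : List (Int × List Int)) (val : PySem.Dict Int Int), (n, cs) ∈ l →
      (∀ c ∈ cs, ((val.get? c).isSome) = true) →
      (((l.foldl bNodeStep val).get? n).isSome) = true := by
  intro l
  induction l with
  | nil => intro val h; cases h
  | cons p l ih =>
    intro val hmem hch
    rcases List.mem_cons.mp hmem with h1 | h1
    · have hpres : (((bNodeStep val p).get? n).isSome) = true := by
        unfold bNodeStep
        by_cases hguard : ((PySem.Dict.get? val p.1).isNone
            && p.2.all fun c => (PySem.Dict.get? val c).isSome) = true
        · rw [if_pos hguard, PySem.Dict.get?_insert, if_pos (show n = p.1 by rw [← h1])]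
          rfl
        · rw [if_neg hguard]
          rw [← h1] at hguard
          simp only [Bool.and_eq_true, Option.isNone_iff_eq_none, List.all_eq_true,
            not_and] at hguard
          cases hget : val.get? n with
          | none =>
            exfalso
            apply hguard hget
            intro c hc
            exact hch c hc
          | some w => rfl
      rw [List.foldl_cons]
      exact bFold_mono hpres

    · rw [List.foldl_cons]
      exact ih (bNodeStep val p) h1 (fun c hc => bNodeStep_mono (hch c hc))

theorem bProgress {emp : Int} {graph : List (Int × List Int)} {salaries : List (Int × Int)}
    (hns : (salaries.map Prod.fst).Nodup) (hng : (graph.map Prod.fst).Nodup) :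
    ∀ k, ((bIter emp graph k (bVal0 salaries)).get? emp).isSome = true ∨
      ∀ n ∈ solvSet graph salaries k,
        ((bIter emp graph k (bVal0 salaries)).get? n).isSome = true := by
  intro k
  induction k with
  | zero => right; intro n hn; simp [solvSet] at hn
  | succ k ih =>
    by_cases hemp : ((bIter emp graph k (bVal0 salaries)).get? emp).isSome = true
    · left
      show (((bRound emp graph (bIter emp graph k (bVal0 salaries))).get? emp).isSome) = true
      exact bRound_mono hemp
    · right
      have hall : ∀ n ∈ solvSet graph salaries k,
          ((bIter emp graph k (bVal0 salaries)).get? n).isSome = true := by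
        rcases ih with h | h
        · exact absurd h hemp
        · exact h
      intro n hn
      obtain ⟨hkeys, hcond⟩ := solv_mem hn
      show (((bRound emp graph (bIter emp graph k (bVal0 salaries))).get? n).isSome) = true
      unfold bRound
      rw [if_neg hemp]
      rcases hcond with h0 | h0
      · exact bFold_mono ((pvTGood_iter hng (pvTGood_val0 hns) k).2 n h0)
      · obtain ⟨cs, hg, hch⟩ := h0
        have hmem : (n, cs) ∈ graph := PySem.Dict.mem_items_of_get?_eq_some _ hg
        exact bEntry_present graph _ hmem (fun c hc => hall c (hch c hc))

theorem dfs_alt_main {emp : Int} {graph : List (Int × List Int)} {salaries : List (Int × Int)}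
    (hns : (salaries.map Prod.fst).Nodup) (hng : (graph.map Prod.fst).Nodup)
    (hget : PySem.Dict.get? (PySem.Dict.mk salaries) emp = some 0)
    (hsolv : emp ∈ solvSet graph salaries (graph.length + 1)) :
    PvVal (PySem.Dict.mk graph) (PySem.Dict.mk salaries) emp (dfs_alt emp graph salaries) := by
  have hpres : ((bIter emp graph (graph.length + 1) (bVal0 salaries)).get? emp).isSome = true := by
    rcases bProgress hns hng (emp := emp) (graph.length + 1) with h | h
    · exact h
    · exact h emp hsolv
  obtain ⟨v, hv⟩ := Option.isSome_iff_exists.mp hpres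
  have hval : PvVal (PySem.Dict.mk graph) (PySem.Dict.mk salaries) emp v :=
    (pvTGood_iter hng (pvTGood_val0 hns) (graph.length + 1)).1 emp v hv
  have : dfs_alt emp graph salaries = v := by
    rw [dfs_alt, hget]
    simp only [ne_eq, not_true_eq_false, if_false]
    rw [PySem.Dict.getD_eq_get?_getD, hv]
    rfl
  rw [this]
  exact hval

-- ===== VERDICT (by name: the statement is the Claim_ definition above) =====
theorem dfs_spec : Claim_equal_dfs := by
  intro emp graph salaries _ hPre
  obtain ⟨hns, hng, hsome, hsolv⟩ := hPre
  unfold Spec_dfs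
  obtain ⟨s, hs⟩ := Option.isSome_iff_exists.mp hsome
  by_cases hs0 : s = 0
  · subst hs0
    have hsolv' := hsolv (by rw [PySem.Dict.getD_eq_get?_getD, hs]; rfl)
    have hA := (dfsA_main graph salaries (graph.length + 1) emp (PySem.Dict.mk salaries)
      (graph.length + 1) hsolv' (pvGood_init _ _) (le_refl _)).1
    have hB := dfs_alt_main hns hng hs hsolv'
    exact pvVal_unique hA hB
  · have hA : dfs emp graph salaries = s := by
      rw [dfs, dfsA, hs]
      simp [hs0]
    have hB : dfs_alt emp graph salaries = s := by
      rw [dfs_alt, hs]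
      simp [hs0]
    rw [hA, hB]
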